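-- pv_equiv track=rewrite | github.com/dr4gon123/flores | generate_changelog.py | _label_descriptions
-- ===== SOURCE A (Python) =====
-- from collections import Counter, defaultdict
--
-- def _normalize_desc(text: str) -> str:
--     return text.strip().lower() if text else ''
--
-- def _canonical_desc(descriptions: list[str]) -> str:
--     return Counter(descriptions).most_common(1)[0][0] if descriptions else ''
--
-- def _label_descriptions(subtype_descs: dict[str, list[str]]) -> str:
--     """Build subtype-labeled description string. Returns plain text if single meaning."""
--     norm_groups: dict[str, list[tuple[str, str]]] = defaultdict(list)
--     for subtype, descs in subtype_descs.items():
--         for desc in descs: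
--             norm = _normalize_desc(desc)
--             if norm:
--                 norm_groups[norm].append((desc, subtype))
--     if not norm_groups:
--         return ''
--     meanings = sorted(
--         [(_canonical_desc([d for d, _ in pairs]), sorted({s for _, s in pairs}))
--          for pairs in norm_groups.values()],
--         key=lambda x: x[1][0],
--     )
--     if len(meanings) == 1:
--         return meanings[0][0]
--     return '\n\n'.join(f"{'/'.join(subtypes)}: {desc}" for desc, subtypes in meanings)
-- ===== SOURCE B (Python) =====
-- def _label_descriptions(subtype_descs: dict[str, list[str]]) -> str:
--     """Build subtype-labeled description string. Returns plain text if single meaning."""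
--     flat = [(d.strip().lower(), d, s) for s, ds in subtype_descs.items() for d in ds]
--     items = sorted([(n, i, d, s) for i, (n, d, s) in enumerate(flat) if n], key=lambda t: t[0])
--     meanings = []
--     i = 0
--     while i < len(items):
--         j = i + 1
--         while j < len(items) and items[j][0] == items[i][0]:
--             j += 1
--         run = items[i:j]
--         i = j
--         cnt = {}
--         for _, _, d, _ in run:
--             cnt[d] = cnt.get(d, 0) + 1
--         desc = min(run, key=lambda t: (-cnt[t[2]], t[1]))[2]
--         subs = sorted({t[3] for t in run})
--         rank = min(t[1] for t in run)
--         meanings.append((desc, subs, rank))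
--     if not meanings:
--         return ''
--     meanings.sort(key=lambda m: m[2])
--     pairs = [(d, ss) for d, ss, _ in meanings]
--     pairs.sort(key=lambda x: x[1][0])
--     if len(pairs) == 1:
--         return pairs[0][0]
--     return '\n\n'.join(f"{'/'.join(subtypes)}: {desc}" for desc, subtypes in pairs)
-- ===== Notes on version B (the rewrite author's own statement) =====
-- stated objective: alternative
-- what changed: Replaces A's defaultdict-of-pairs grouping plus Counter/_canonical_desc recompute with a sort-based pipeline: flatten to index-decorated (norm, i, desc, subtype) tuples, sort once by norm, cut the sorted list into equal-norm runs, pick each run's canonical spelling as the entry minimizing (-count, first-index), and restore first-occurrence order with a rank sort before the final sort by subtype.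
import Mathlib
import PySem

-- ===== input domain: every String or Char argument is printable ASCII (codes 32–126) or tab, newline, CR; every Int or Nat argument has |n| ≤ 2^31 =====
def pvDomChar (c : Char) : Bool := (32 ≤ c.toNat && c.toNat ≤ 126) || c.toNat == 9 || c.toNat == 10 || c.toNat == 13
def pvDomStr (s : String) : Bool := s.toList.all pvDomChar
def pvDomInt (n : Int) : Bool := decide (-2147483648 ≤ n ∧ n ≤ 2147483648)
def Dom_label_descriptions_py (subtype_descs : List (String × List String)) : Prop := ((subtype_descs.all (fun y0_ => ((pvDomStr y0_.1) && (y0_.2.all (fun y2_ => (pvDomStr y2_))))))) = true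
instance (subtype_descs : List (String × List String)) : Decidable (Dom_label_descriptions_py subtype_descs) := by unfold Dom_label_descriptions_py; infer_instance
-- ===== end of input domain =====

-- B replaces A's defaultdict grouping and Counter machinery with a sort-based pipeline (sort the
-- index-decorated flat list once by normalized description, cut it into runs, pick each run's
-- canonical spelling by minimizing (-count, first index), rank-sort back to first-occurrence
-- order); objective: alternative (no change in behaviour is intended).

-- ===== PORT A =====
def pvNormalizeDesc (t : String) : String :=
  if t ≠ "" then PySem.Str.lower (PySem.Str.strip t) else ""

-- Counter(descriptions).most_common(1)[0][0]: CPython's most_common(1) is heapq.nlargest(1, items,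
-- key=itemgetter(1)), i.e. [max(items, key=itemgetter(1))] — the first maximal item in insertion
-- order, which is exactly PySem.List.max?; [0][0] on the guaranteed-nonempty result is .getD + .1.
def pvCanonicalDesc (descriptions : List String) : String :=
  if descriptions ≠ [] then
    ((PySem.List.max? (PySem.Dict.counter descriptions).items (fun p => p.2)).getD ("", 0)).1
  else ""

def label_descriptions_py (subtype_descs : List (String × List String)) : String :=
  let ng : PySem.Dict String (List (String × String)) :=
    subtype_descs.foldl (fun d p =>
      p.2.foldl (fun d desc =>
        let norm := pvNormalizeDesc desc
        if norm ≠ "" then d.modify norm [] (· ++ [(desc, p.1)]) else d) d)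
      PySem.Dict.empty
  if ng.items = [] then ""
  else
    let meanings :=
      PySem.List.sorted
        (ng.values.map (fun pairs =>
          (pvCanonicalDesc (pairs.map (·.1)),
           PySem.List.sorted (PySem.Set.ofList (pairs.map (·.2))) (fun s => s) false)))
        (fun x => PySem.List.pyGetD x.2 0 "") false
    if meanings.length = 1 then (PySem.List.pyGetD meanings 0 ("", [])).1
    else PySem.Str.join "\n\n" (meanings.map (fun m => PySem.Str.join "/" m.2 ++ ": " ++ m.1))

-- ===== PORT B =====
-- B's inner while loop: cut the (sorted) list into maximal runs of equal normalized description;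
-- the index scan 'j += 1 while items[j][0] == items[i][0]' with 'run = items[i:j]; i = j' is
-- exactly takeWhile/dropWhile on that equality over the remaining list.
def pvRunsB (rest : List (String × Int × String × String)) :
    List (List (String × Int × String × String)) :=
  match rest with
  | [] => []
  | t :: r =>
    (t :: r.takeWhile (fun u => u.1 == t.1)) :: pvRunsB (r.dropWhile (fun u => u.1 == t.1))
termination_by rest.length
decreasing_by
  simpa using Nat.lt_succ_of_le (List.length_dropWhile_le _ _)

def label_descriptions_py_alt (subtype_descs : List (String × List String)) : String :=
  let flat := subtype_descs.flatMap (fun p =>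
    p.2.map (fun d => (PySem.Str.lower (PySem.Str.strip d), d, p.1)))
  let items := PySem.List.sorted
      (((PySem.List.enumerate flat).filter (fun q => q.2.1 ≠ "")).map
        (fun q => (q.2.1, q.1, q.2.2.1, q.2.2.2)))
      (fun t => t.1) false
  let meanings := (pvRunsB items).map (fun run =>
      let cnt : PySem.Dict String Int :=
        run.foldl (fun c t => c.modify t.2.2.1 0 (· + 1)) PySem.Dict.empty
      -- min(run, key=lambda t: (-cnt[t[2]], t[1]))[2]
      let desc := ((PySem.List.min2? run (fun t => -(cnt.getD t.2.2.1 0)) (fun t => t.2.1)).getD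
        ("", 0, "", "")).2.2.1
      let subs := PySem.List.sorted (PySem.Set.ofList (run.map (fun t => t.2.2.2)))
        (fun s => s) false
      let rank := (PySem.List.min? (run.map (fun t => t.2.1)) (fun i => i)).getD 0
      (desc, subs, rank))
  if meanings = [] then ""
  else
    let meanings2 := PySem.List.sorted meanings (fun m => m.2.2) false
    let pairs := meanings2.map (fun m => (m.1, m.2.1))
    let pairs2 := PySem.List.sorted pairs (fun x => PySem.List.pyGetD x.2 0 "") false
    if pairs2.length = 1 then (PySem.List.pyGetD pairs2 0 ("", [])).1
    else PySem.Str.join "\n\n" (pairs2.map (fun m => PySem.Str.join "/" m.2 ++ ": " ++ m.1))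

-- ===== PRECONDITION & SPEC =====
def Spec_label_descriptions_py (subtype_descs : List (String × List String)) (out : String) : Prop :=
  out = label_descriptions_py_alt subtype_descs
instance (subtype_descs : List (String × List String)) (out : String) : Decidable (Spec_label_descriptions_py subtype_descs out) := by
  unfold Spec_label_descriptions_py; infer_instance

-- ===== CLAIM (what is proved, stated in full; the proofs are below) =====
def Claim_equal_label_descriptions_py : Prop := ∀ (subtype_descs : List (String × List String)), Dom_label_descriptions_py subtype_descs → Spec_label_descriptions_py subtype_descs (label_descriptions_py subtype_descs)

-- ===== LEMMAS AND PROOFS =====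

theorem pvNormalizeDesc_eq (t : String) :
    pvNormalizeDesc t = PySem.Str.lower (PySem.Str.strip t) := by
  unfold pvNormalizeDesc
  split
  · rfl
  · next h =>
    simp only [ne_eq, not_not] at h
    subst h
    decide

-- the flat (norm, desc, subtype) list both versions start from
def pvFlat (sd : List (String × List String)) : List (String × String × String) :=
  sd.flatMap (fun p => p.2.map (fun d => (PySem.Str.lower (PySem.Str.strip d), d, p.1)))

-- A's nested grouping loop is the single fold of the (filtered) flat list
theorem pvNg_eq (sd : List (String × List String)) :
    sd.foldl (fun d p =>
      p.2.foldl (fun d desc =>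
        if pvNormalizeDesc desc ≠ "" then d.modify (pvNormalizeDesc desc) [] (· ++ [(desc, p.1)]) else d) d)
      PySem.Dict.empty
    = ((pvFlat sd).filter (fun t => t.1 ≠ "")).foldl
        (fun d t => d.modify t.1 [] (· ++ [t.2])) PySem.Dict.empty := by
  calc
    sd.foldl (fun d p =>
      p.2.foldl (fun d desc =>
        if pvNormalizeDesc desc ≠ "" then d.modify (pvNormalizeDesc desc) [] (· ++ [(desc, p.1)]) else d) d)
      PySem.Dict.empty
      = (pvFlat sd).foldl
          (fun d t => if t.1 ≠ "" then d.modify t.1 [] (· ++ [t.2]) else d) PySem.Dict.empty := by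
        rw [pvFlat, List.foldl_flatMap]
        simp only [List.foldl_map, pvNormalizeDesc_eq]
    _ = ((pvFlat sd).filter (fun t => t.1 ≠ "")).foldl
          (fun d t => d.modify t.1 [] (· ++ [t.2])) PySem.Dict.empty :=
        PySem.List.foldl_ite_eq_foldl_filter _ _ _ _

-- the running max of max?'s fold only grows
theorem pvMaxStep_mono {α κ : Type} [LinearOrder κ] (key : α → κ) (l : List α) (m : α) :
    ∃ m', List.foldl (fun acc x => match acc with
        | none => some x
        | some m => if key m < key x then some x else some m) (some m) l = some m'
      ∧ key m ≤ key m' := by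
  induction l generalizing m with
  | nil => exact ⟨m, rfl, le_refl _⟩
  | cons x l ih =>
    simp only [List.foldl_cons]
    by_cases h : key m < key x
    · simp only [if_pos h]
      obtain ⟨m', hm', hle⟩ := ih x
      exact ⟨m', hm', le_of_lt (lt_of_lt_of_le h hle)⟩
    · simp only [if_neg h]
      exact ih m

-- the running max dominates every consumed element
theorem pvMaxStep_dom {α κ : Type} [LinearOrder κ] (key : α → κ) (l : List α) (acc : Option α)
    (y : α) (hy : y ∈ l) :
    ∃ m, List.foldl (fun acc x => match acc with
        | none => some x
        | some m => if key m < key x then some x else some m) acc l = some m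
      ∧ key y ≤ key m := by
  induction l generalizing acc with
  | nil => cases hy
  | cons x l ih =>
    simp only [List.foldl_cons]
    rcases List.mem_cons.mp hy with rfl | hy'
    · cases acc with
      | none =>
        obtain ⟨m', hm', hle'⟩ := pvMaxStep_mono key l y
        exact ⟨m', hm', hle'⟩
      | some m =>
        by_cases h : key m < key y
        · simp only [if_pos h]
          obtain ⟨m', hm', hle'⟩ := pvMaxStep_mono key l y
          exact ⟨m', hm', hle'⟩
        · simp only [if_neg h]
          obtain ⟨m', hm', hle'⟩ := pvMaxStep_mono key l m
          exact ⟨m', hm', le_trans (le_of_not_gt h) hle'⟩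
    · cases acc with
      | none => exact ih (some x) hy'
      | some m =>
        by_cases h : key m < key x
        · simp only [if_pos h]; exact ih (some x) hy'
        · simp only [if_neg h]; exact ih (some m) hy'

-- max? over the in-order dedup (set(xs)) equals max? over the list itself
theorem pvMax?_ofList_aux {α κ : Type} [BEq α] [LawfulBEq α] [LinearOrder κ] (key : α → κ)
    (xs : List α) : ∀ (s : List α) (acc : Option α),
    List.foldl (fun acc x => match acc with
        | none => some x
        | some m => if key m < key x then some x else some m) acc (xs.foldl PySem.Set.add s)
    = List.foldl (fun acc x => match acc with
        | none => some x
        | some m => if key m < key x then some x else some m)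
        (List.foldl (fun acc x => match acc with
          | none => some x
          | some m => if key m < key x then some x else some m) acc s) xs := by
  induction xs with
  | nil => intro s acc; rfl
  | cons x xs ih =>
    intro s acc
    simp only [List.foldl_cons]
    by_cases hm : x ∈ s
    · have hadd : PySem.Set.add s x = s := by
        simp [PySem.Set.add, PySem.Set.contains, hm]
      rw [hadd, ih s acc]
      obtain ⟨m, hm', hle⟩ := pvMaxStep_dom key s acc x hm
      rw [hm']
      simp [not_lt_of_ge hle]
    · have hadd : PySem.Set.add s x = s ++ [x] := by
        simp [PySem.Set.add, PySem.Set.contains, hm]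
      rw [hadd, ih (s ++ [x]) acc, List.foldl_append]
      rfl

theorem pvMax?_ofList {α κ : Type} [BEq α] [LawfulBEq α] [LinearOrder κ] (key : α → κ)
    (xs : List α) : PySem.List.max? (PySem.Set.ofList xs) key = PySem.List.max? xs key := by
  unfold PySem.List.max?
  exact pvMax?_ofList_aux key xs [] none

-- first-maximum commutes with map
theorem pvMax?_map {α β κ : Type} [LT κ] [DecidableLT κ] (xs : List α) (f : α → β) (key : β → κ) :
    PySem.List.max? (xs.map f) key = (PySem.List.max? xs (fun x => key (f x))).map f := by
  unfold PySem.List.max?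
  suffices h : ∀ acc : Option α,
      List.foldl (fun acc x => match acc with
        | none => some x
        | some m => if key m < key x then some x else some m) (acc.map f) (xs.map f)
      = (List.foldl (fun acc x => match acc with
        | none => some x
        | some m => if key (f m) < key (f x) then some x else some m) acc xs).map f by
    simpa using h none
  induction xs with
  | nil => intro acc; rfl
  | cons x xs ih =>
    intro acc
    simp only [List.map_cons, List.foldl_cons]
    cases acc with
    | none => exact ih (some x)
    | some m =>
      simp only [Option.map_some]
      by_cases h : key (f m) < key (f x)
      · simp only [if_pos h]; exact ih (some x)
      · simp only [if_neg h]; exact ih (some m)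

-- a dict with Nodup keys: values = keys looked up
theorem pvValues_eq_map_getD {κ ν : Type} [BEq κ] [LawfulBEq κ] (l : List (κ × ν)) (d0 : ν)
    (h : (l.map Prod.fst).Nodup) :
    l.map Prod.snd = (l.map Prod.fst).map (fun k => (PySem.Dict.mk l).getD k d0) := by
  induction l with
  | nil => rfl
  | cons p rest ih =>
    obtain ⟨k0, v0⟩ := p
    simp only [List.map_cons, List.nodup_cons] at h ⊢
    congr 1
    · simp [PySem.Dict.getD, PySem.Dict.get?_mk_cons]
    · rw [ih h.2]
      apply List.map_congr_left
      intro k hk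
      have hne : ¬ (k0 == k) = true := by
        simp only [beq_iff_eq]
        intro he; exact h.1 (he ▸ hk)
      simp [PySem.Dict.getD, PySem.Dict.get?_mk_cons, hne]

-- A's Counter(descs).most_common(1)[0][0] is the first count-maximal element of descs
theorem pvCanonical_eq (descs : List String) :
    pvCanonicalDesc descs
      = (PySem.List.max? descs (fun d => (descs.count d : Int))).getD "" := by
  by_cases h : descs = []
  · subst h; rfl
  unfold pvCanonicalDesc
  rw [if_pos h, PySem.Dict.items_counter, pvMax?_map]
  have hkey : PySem.List.max? (PySem.Set.ofList descs) (fun x => ((descs.count x : Int)))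
      = PySem.List.max? descs (fun x => ((descs.count x : Int))) :=
    pvMax?_ofList _ _
  rw [hkey]
  obtain ⟨m, hm⟩ : ∃ m, PySem.List.max? descs (fun x => ((descs.count x : Int))) = some m := by
    cases hmx : PySem.List.max? descs (fun x => ((descs.count x : Int))) with
    | none => rw [PySem.List.max?_eq_none_iff] at hmx; exact absurd hmx h
    | some m => exact ⟨m, rfl⟩
  simp [hm]

-- ==== Set.ofList plumbing ====

-- folding Set.add over a list whose head element is already pinned first
theorem pvAdd_cons_filter {α : Type} [BEq α] [LawfulBEq α] (l : List α) :
    ∀ (s : List α) (a : α),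
    List.foldl PySem.Set.add (a :: s) l
      = a :: List.foldl PySem.Set.add s (l.filter (fun x => !(x == a))) := by
  induction l with
  | nil => intro s a; rfl
  | cons x l ih =>
    intro s a
    simp only [List.foldl_cons, List.filter_cons]
    by_cases hxa : x = a
    · subst hxa
      have h1 : PySem.Set.add (x :: s) x = x :: s := by
        simp [PySem.Set.add, PySem.Set.contains]
      simp only [beq_self_eq_true, Bool.not_true, if_neg (by simp : ¬ (false = true))]
      rw [h1, ih s x]
    · have hb : (!(x == a)) = true := by simp [hxa]
      rw [if_pos hb]
      by_cases hmem : x ∈ s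
      · have h1 : PySem.Set.add (a :: s) x = a :: s := by
          simp [PySem.Set.add, PySem.Set.contains, hmem]
        have h2 : PySem.Set.add s x = s := by
          simp [PySem.Set.add, PySem.Set.contains, hmem]
        rw [List.foldl_cons, h1, h2, ih s a]
      · have h1 : PySem.Set.add (a :: s) x = a :: (s ++ [x]) := by
          simp [PySem.Set.add, PySem.Set.contains, hmem, hxa]
        have h2 : PySem.Set.add s x = s ++ [x] := by
          simp [PySem.Set.add, PySem.Set.contains, hmem]
        rw [List.foldl_cons, h1, h2, ih (s ++ [x]) a]

theorem pvOfList_cons {α : Type} [BEq α] [LawfulBEq α] (a : α) (l : List α) :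
    PySem.Set.ofList (a :: l) = a :: PySem.Set.ofList (l.filter (fun x => !(x == a))) := by
  show List.foldl PySem.Set.add PySem.Set.empty (a :: l) = _
  rw [List.foldl_cons]
  have h1 : PySem.Set.add PySem.Set.empty a = [a] := by
    simp [PySem.Set.add, PySem.Set.contains, PySem.Set.empty]
  rw [h1]
  exact pvAdd_cons_filter l [] a

-- Set.ofList of permuted lists are permutations of each other
theorem pvOfList_perm {α : Type} [BEq α] [LawfulBEq α] {xs ys : List α} (h : xs.Perm ys) :
    (PySem.Set.ofList xs).Perm (PySem.Set.ofList ys) := by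
  rw [List.perm_ext_iff_of_nodup (PySem.Set.nodup_ofList xs) (PySem.Set.nodup_ofList ys)]
  intro a
  rw [PySem.Set.mem_ofList, PySem.Set.mem_ofList]
  exact ⟨fun ha => h.mem_iff.mp ha, fun ha => h.mem_iff.mpr ha⟩

-- ==== stability of Python's sort, in the form the proof needs ====

-- where insertBy puts its element in a key-sorted list
theorem pvInsertBy_split {α κ : Type} [LinearOrder κ] (key : α → κ) (x : α) (L : List α)
    (hL : L.Pairwise (fun a b => key a ≤ key b)) :
    ∃ L1 L2, L = L1 ++ L2
      ∧ PySem.List.insertBy (fun a b => decide (key a < key b)) x L = L1 ++ x :: L2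
      ∧ (∀ y ∈ L1, ¬ key x < key y) ∧ (∀ y ∈ L2, key x < key y) := by
  induction L with
  | nil => exact ⟨[], [], rfl, rfl, by simp, by simp⟩
  | cons y ys ih =>
    rw [List.pairwise_cons] at hL
    by_cases h : key x < key y
    · refine ⟨[], y :: ys, rfl, ?_, by simp, ?_⟩
      · simp [PySem.List.insertBy, h]
      · intro z hz
        rcases List.mem_cons.mp hz with rfl | hz'
        · exact h
        · exact lt_of_lt_of_le h (hL.1 z hz')
    · obtain ⟨L1, L2, hsplit, hins, h1, h2⟩ := ih hL.2
      refine ⟨y :: L1, L2, by rw [hsplit]; rfl, ?_, ?_, h2⟩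
      · simp only [PySem.List.insertBy, h, decide_false]
        rw [if_neg (by simp : ¬ (false = true)), hins]
        rfl
      · intro z hz
        rcases List.mem_cons.mp hz with rfl | hz'
        · exact h
        · exact h1 z hz'

-- stability, filtered form: the entries of one key-class keep their original order
theorem pvSorted_filter_key {α : Type} (key : α → String) (xs : List α) (k : String) :
    (PySem.List.sorted xs key).filter (fun a => key a == k)
      = xs.filter (fun a => key a == k) := by
  induction xs using List.reverseRecOn with
  | nil => rfl
  | append_singleton xs x ih =>
    have hs : PySem.List.sorted (xs ++ [x]) key
        = PySem.List.insertBy (fun a b => decide (key a < key b)) x (PySem.List.sorted xs key) := by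
      rw [PySem.List.sorted_eq_foldl_insertBy, PySem.List.sorted_eq_foldl_insertBy,
        List.foldl_append]
      rfl
    obtain ⟨L1, L2, hsplit, hins, h1, h2⟩ :=
      pvInsertBy_split key x (PySem.List.sorted xs key) (PySem.List.sorted_pairwise xs key)
    rw [hs, hins, List.filter_append, List.filter_cons]
    by_cases hk : key x = k
    · have hL2 : L2.filter (fun a => key a == k) = [] := by
        rw [List.filter_eq_nil_iff]
        intro y hy
        have := h2 y hy
        simp only [beq_iff_eq]
        intro he
        exact absurd (hk ▸ he ▸ this) (lt_irrefl _)
      have hL2' : L2.filter (fun a => key a == k) = [] := hL2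
      have hxs : xs.filter (fun a => key a == k) ++ [x]
          = (xs ++ [x]).filter (fun a => key a == k) := by
        rw [List.filter_append, List.filter_cons]
        simp [hk]
      rw [if_pos (by simp [hk])]
      have hfull : (PySem.List.sorted xs key).filter (fun a => key a == k)
          = L1.filter (fun a => key a == k) ++ L2.filter (fun a => key a == k) := by
        rw [hsplit, List.filter_append]
      rw [hL2, ← hxs, ← ih, hfull, hL2']
      simp
    · rw [if_neg (by simp [hk])]
      have hfull : (PySem.List.sorted xs key).filter (fun a => key a == k)
          = L1.filter (fun a => key a == k) ++ L2.filter (fun a => key a == k) := by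
        rw [hsplit, List.filter_append]
      rw [← hfull, ih, List.filter_append, List.filter_cons]
      simp [hk]

-- ==== min with a strictly increasing tiebreaker ====

-- min2? with keys (-count, index) on a list with strictly increasing indices IS max? by count
theorem pvMin2_eq_max_aux (cntK idxK : (String × Int × String × String) → Int) :
    ∀ (l : List (String × Int × String × String)) (m : String × Int × String × String),
    List.Pairwise (fun a b => idxK a < idxK b) l →
    (∀ x ∈ l, idxK m < idxK x) →
    PySem.List.min2? (m :: l) (fun t => -(cntK t)) idxK = PySem.List.max? (m :: l) cntK := by
  intro l
  induction l with
  | nil => intro m _ _; rfl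
  | cons x l ih =>
    intro m hpw hm
    rw [List.pairwise_cons] at hpw
    have hidx : idxK m < idxK x := hm x List.mem_cons_self
    have e1 : PySem.List.min2? (m :: x :: l) (fun t => -(cntK t)) idxK
        = PySem.List.min2? ((if cntK m < cntK x then x else m) :: l) (fun t => -(cntK t)) idxK := by
      unfold PySem.List.min2?
      simp only [List.foldl_cons]
      congr 1
      show (if (decide (-(cntK x) < -(cntK m)) || !decide (-(cntK m) < -(cntK x)) && decide (idxK x < idxK m)) = true
            then some x else some m)
          = some (if cntK m < cntK x then x else m)
      have h2 : decide (idxK x < idxK m) = false := by simp [not_lt_of_gt hidx]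
      by_cases h : cntK m < cntK x
      · simp [h2, h, neg_lt_neg_iff]
      · simp [h2, h, neg_lt_neg_iff]
    have e2 : PySem.List.max? (m :: x :: l) cntK
        = PySem.List.max? ((if cntK m < cntK x then x else m) :: l) cntK := by
      unfold PySem.List.max?
      simp only [List.foldl_cons]
      congr 1
      show (if cntK m < cntK x then some x else some m) = some (if cntK m < cntK x then x else m)
      by_cases h : cntK m < cntK x
      · simp [h]
      · simp [h]
    rw [e1, e2]
    apply ih _ hpw.2
    intro y hy
    by_cases h : cntK m < cntK x
    · simp only [if_pos h]; exact hpw.1 y hy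
    · simp only [if_neg h]; exact hm y (List.mem_cons_of_mem _ hy)

theorem pvMin2_eq_max (cntK idxK : (String × Int × String × String) → Int)
    (l : List (String × Int × String × String))
    (hpw : List.Pairwise (fun a b => idxK a < idxK b) l) :
    PySem.List.min2? l (fun t => -(cntK t)) idxK = PySem.List.max? l cntK := by
  cases l with
  | nil => rfl
  | cons m l =>
    rw [List.pairwise_cons] at hpw
    exact pvMin2_eq_max_aux cntK idxK l m hpw.2 hpw.1

-- min? of a strictly increasing Int list is its head
theorem pvMin?_head (x : Int) (t : List Int) (h : ∀ y ∈ t, x < y) :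
    PySem.List.min? (x :: t) (fun i => i) = some x := by
  rw [PySem.List.min?_id_cons]
  congr 1
  refine le_antisymm (PySem.List.foldl_min_le t x).1 ?_
  rcases PySem.List.foldl_min_mem t x with he | hm
  · exact le_of_eq he.symm
  · exact le_of_lt (h _ hm)

-- ==== the run decomposition of the sorted list ====

theorem pvDropWhile_head {α : Type} (p : α → Bool) (l : List α) (h : α) (t' : List α)
    (hd : l.dropWhile p = h :: t') : p h = false := by
  induction l with
  | nil => simp at hd
  | cons x l ih =>
    rw [List.dropWhile_cons] at hd
    by_cases hp : p x = true
    · rw [if_pos hp] at hd; exact ih hd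
    · rw [if_neg hp] at hd
      cases hd
      simpa using hp

theorem pvRuns_eq (items : List (String × Int × String × String))
    (h : items.Pairwise (fun a b => a.1 ≤ b.1)) :
    pvRunsB items
      = (PySem.Set.ofList (items.map (fun t => t.1))).map
          (fun k => items.filter (fun t => t.1 == k)) := by
  induction items using pvRunsB.induct with
  | case1 => simp [pvRunsB, PySem.Set.ofList, PySem.Set.empty]
  | case2 t r ih =>
    rw [List.pairwise_cons] at h
    have ht : ∀ y ∈ r, t.1 ≤ y.1 := h.1
    have hr : r.Pairwise (fun a b => a.1 ≤ b.1) := h.2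
    have hsplit : r.takeWhile (fun u => u.1 == t.1) ++ r.dropWhile (fun u => u.1 == t.1) = r :=
      List.takeWhile_append_dropWhile
    have htw : ∀ u ∈ r.takeWhile (fun u => u.1 == t.1), u.1 = t.1 := by
      intro u hu
      have := List.mem_takeWhile_imp hu
      simpa using this
    have hpw_dw : (r.dropWhile (fun u => u.1 == t.1)).Pairwise (fun a b => a.1 ≤ b.1) :=
      hr.sublist (List.dropWhile_sublist _)
    have hdw_ne : ∀ u ∈ r.dropWhile (fun u => u.1 == t.1), u.1 ≠ t.1 := by
      intro u hu
      cases hdwe : r.dropWhile (fun u => u.1 == t.1) with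
      | nil => rw [hdwe] at hu; cases hu
      | cons hd tl =>
        have hhd : (hd.1 == t.1) = false := pvDropWhile_head _ r hd tl hdwe
        have hhd' : hd.1 ≠ t.1 := by simpa using hhd
        have hmemr : hd ∈ r :=
          (List.dropWhile_sublist _).mem (by rw [hdwe]; exact List.mem_cons_self)
        have hlt : t.1 < hd.1 := lt_of_le_of_ne (ht hd hmemr) (Ne.symm hhd')
        rw [hdwe] at hu
        rcases List.mem_cons.mp hu with rfl | hu'
        · exact hhd'
        · rw [hdwe, List.pairwise_cons] at hpw_dw
          have hle : hd.1 ≤ u.1 := hpw_dw.1 u hu'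
          exact fun he => absurd (he ▸ lt_of_lt_of_le hlt hle) (lt_irrefl _)
    have hfilt_t : (t :: r).filter (fun u => u.1 == t.1)
        = t :: r.takeWhile (fun u => u.1 == t.1) := by
      rw [List.filter_cons, if_pos (by simp)]
      congr 1
      conv_lhs => rw [← hsplit]
      rw [List.filter_append]
      have h1 : (r.takeWhile (fun u => u.1 == t.1)).filter (fun u => u.1 == t.1)
          = r.takeWhile (fun u => u.1 == t.1) := by
        rw [List.filter_eq_self]
        intro u hu; simp [htw u hu]
      have h2 : (r.dropWhile (fun u => u.1 == t.1)).filter (fun u => u.1 == t.1) = [] := by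
        rw [List.filter_eq_nil_iff]
        intro u hu; simp [hdw_ne u hu]
      rw [h1, h2, List.append_nil]
    have hfilt_k : ∀ k, k ≠ t.1 → (t :: r).filter (fun u => u.1 == k)
        = (r.dropWhile (fun u => u.1 == t.1)).filter (fun u => u.1 == k) := by
      intro k hk
      rw [List.filter_cons, if_neg (by simp; exact fun he => hk he.symm)]
      conv_lhs => rw [← hsplit]
      rw [List.filter_append]
      have h1 : (r.takeWhile (fun u => u.1 == t.1)).filter (fun u => u.1 == k) = [] := by
        rw [List.filter_eq_nil_iff]
        intro u hu
        simp only [beq_iff_eq]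
        rw [htw u hu]
        exact fun he => hk he.symm
      rw [h1, List.nil_append]
    have hofl : PySem.Set.ofList ((t :: r).map (fun u => u.1))
        = t.1 :: PySem.Set.ofList ((r.dropWhile (fun u => u.1 == t.1)).map (fun u => u.1)) := by
      rw [List.map_cons, pvOfList_cons]
      congr 1
      conv_lhs => rw [← hsplit]
      rw [List.map_append, List.filter_append]
      have h1 : ((r.takeWhile (fun u => u.1 == t.1)).map (fun u => u.1)).filter
          (fun x => !(x == t.1)) = [] := by
        rw [List.filter_eq_nil_iff]
        intro x hx
        obtain ⟨u, hu, rfl⟩ := List.mem_map.mp hx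
        simp [htw u hu]
      have h2 : ((r.dropWhile (fun u => u.1 == t.1)).map (fun u => u.1)).filter
          (fun x => !(x == t.1)) = (r.dropWhile (fun u => u.1 == t.1)).map (fun u => u.1) := by
        rw [List.filter_eq_self]
        intro x hx
        obtain ⟨u, hu, rfl⟩ := List.mem_map.mp hx
        simp [hdw_ne u hu]
      rw [h1, h2, List.nil_append]
    conv_lhs => rw [pvRunsB]
    rw [hofl, List.map_cons, hfilt_t]
    have hmapc : (PySem.Set.ofList ((r.dropWhile (fun u => u.1 == t.1)).map (fun u => u.1))).map
          (fun k => (t :: r).filter (fun u => u.1 == k))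
        = (PySem.Set.ofList ((r.dropWhile (fun u => u.1 == t.1)).map (fun u => u.1))).map
          (fun k => (r.dropWhile (fun u => u.1 == t.1)).filter (fun u => u.1 == k)) := by
      apply List.map_congr_left
      intro k hk
      have hk' : k ∈ (r.dropWhile (fun u => u.1 == t.1)).map (fun u => u.1) :=
        (PySem.Set.mem_ofList _ _).mp hk
      obtain ⟨u, hu, rfl⟩ := List.mem_map.mp hk'
      exact hfilt_k u.1 (hdw_ne u hu)
    rw [hmapc, ← ih hpw_dw]


-- rank (= first index) of each norm, in first-occurrence order, is strictly increasing
def pvRank (es : List (String × Int × String × String)) (k : String) : Int :=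
  (PySem.List.min? ((es.filter (fun t => t.1 == k)).map (fun t => t.2.1)) (fun i => i)).getD 0

theorem pvRank_pairwise_aux :
    ∀ (n : Nat) (es : List (String × Int × String × String)), es.length ≤ n →
    es.Pairwise (fun a b => a.2.1 < b.2.1) →
    (PySem.Set.ofList (es.map (fun t => t.1))).Pairwise
      (fun k1 k2 => pvRank es k1 < pvRank es k2) := by
  intro n
  induction n with
  | zero =>
    intro es hlen _
    rw [List.eq_nil_of_length_eq_zero (Nat.le_zero.mp hlen)]
    simp [PySem.Set.ofList, PySem.Set.empty]
  | succ n ihn =>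
    intro es hlen h
    cases es with
    | nil => simp [PySem.Set.ofList, PySem.Set.empty]
    | cons e es =>
      rw [List.pairwise_cons] at h
      have he : ∀ y ∈ es, e.2.1 < y.2.1 := h.1
      have hp : es.Pairwise (fun a b => a.2.1 < b.2.1) := h.2
      rw [List.map_cons, pvOfList_cons]
      have hfm : (es.map (fun t => t.1)).filter (fun x => !(x == e.1))
          = (es.filter (fun u => !(u.1 == e.1))).map (fun t => t.1) := by
        rw [List.filter_map]
        rfl
      rw [hfm]
      have hne : ∀ k ∈ (es.filter (fun u => !(u.1 == e.1))).map (fun t => t.1), k ≠ e.1 := by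
        intro k hk
        obtain ⟨u, hu, rfl⟩ := List.mem_map.mp hk
        have := List.of_mem_filter hu
        simpa using this
      have hrank_e : pvRank (e :: es) e.1 = e.2.1 := by
        unfold pvRank
        rw [List.filter_cons, if_pos (by simp), List.map_cons]
        rw [pvMin?_head]
        · rfl
        · intro y hy
          obtain ⟨v, hv, rfl⟩ := List.mem_map.mp hy
          exact he v (List.mem_filter.mp hv).1
      have hrank_tail : ∀ k, k ≠ e.1 → pvRank (e :: es) k = pvRank es k := by
        intro k hk
        unfold pvRank
        rw [List.filter_cons, if_neg (by simp; exact fun hc => hk hc.symm)]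
      have hrank_lt : ∀ k, k ∈ es.map (fun t => t.1) → e.2.1 < pvRank es k := by
        intro k hk
        obtain ⟨u, hu, rfl⟩ := List.mem_map.mp hk
        have hne' : (es.filter (fun t => t.1 == u.1)).map (fun t => t.2.1) ≠ [] := by
          have hmemf : u ∈ es.filter (fun t => t.1 == u.1) :=
            List.mem_filter.mpr ⟨hu, by simp⟩
          intro hc
          have := List.mem_map_of_mem (f := fun t => t.2.1) hmemf
          rw [hc] at this
          cases this
        obtain ⟨j, hj⟩ : ∃ j, PySem.List.min? ((es.filter (fun t => t.1 == u.1)).map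
            (fun t => t.2.1)) (fun i => i) = some j := by
          cases hmx : PySem.List.min? ((es.filter (fun t => t.1 == u.1)).map (fun t => t.2.1))
              (fun i => i) with
          | none => rw [PySem.List.min?_eq_none_iff] at hmx; exact absurd hmx hne'
          | some j => exact ⟨j, rfl⟩
        have hjm : j ∈ (es.filter (fun t => t.1 == u.1)).map (fun t => t.2.1) :=
          PySem.List.min?_mem hj
        obtain ⟨v, hv, rfl⟩ := List.mem_map.mp hjm
        unfold pvRank
        rw [hj]
        exact he v (List.mem_filter.mp hv).1
      have hrank_ff : ∀ k, k ≠ e.1 →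
          pvRank (es.filter (fun u => !(u.1 == e.1))) k = pvRank es k := by
        intro k hk
        unfold pvRank
        congr 2
        rw [List.filter_filter]
        congr 1
        apply List.filter_congr
        intro u _
        by_cases hu : u.1 = k
        · simp [hu, hk]
        · simp [hu]
      constructor
      · intro k hk
        have hk1 : k ≠ e.1 := hne k ((PySem.Set.mem_ofList _ _).mp hk)
        rw [hrank_e, hrank_tail k hk1]
        apply hrank_lt
        have hk' := (PySem.Set.mem_ofList _ _).mp hk
        obtain ⟨u, hu, rfl⟩ := List.mem_map.mp hk'
        exact List.mem_map_of_mem (List.mem_of_mem_filter hu)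
      · have hsub : (es.filter (fun u => !(u.1 == e.1))).Pairwise
            (fun a b => a.2.1 < b.2.1) := hp.sublist List.filter_sublist
        have hlen' : (es.filter (fun u => !(u.1 == e.1))).length ≤ n := by
          have h1 := List.length_filter_le (fun u => !(u.1 == e.1)) es
          have h2 : es.length ≤ n := Nat.le_of_succ_le_succ hlen
          omega
        have ihp := ihn _ hlen' hsub
        refine ihp.imp_of_mem ?_
        intro a b ha hb hab
        have ha1 : a ≠ e.1 := hne a ((PySem.Set.mem_ofList _ _).mp ha)
        have hb1 : b ≠ e.1 := hne b ((PySem.Set.mem_ofList _ _).mp hb)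
        rw [hrank_tail a ha1, hrank_tail b hb1, ← hrank_ff a ha1, ← hrank_ff b hb1]
        exact hab

theorem pvRank_pairwise (es : List (String × Int × String × String))
    (h : es.Pairwise (fun a b => a.2.1 < b.2.1)) :
    (PySem.Set.ofList (es.map (fun t => t.1))).Pairwise
      (fun k1 k2 => pvRank es k1 < pvRank es k2) :=
  pvRank_pairwise_aux es.length es (le_refl _) h

theorem pvMin2_eq_max' (k1 cntK idxK : (String × Int × String × String) → Int)
    (l : List (String × Int × String × String))
    (hk : ∀ t, k1 t = -(cntK t))
    (hpw : List.Pairwise (fun a b => idxK a < idxK b) l) :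
    PySem.List.min2? l k1 idxK = PySem.List.max? l cntK := by
  have he : k1 = fun t => -(cntK t) := funext hk
  rw [he]
  exact pvMin2_eq_max cntK idxK l hpw

-- one run of B: the dict-counted min2? pick is the first count-maximal description
theorem pvGroup_desc (Ek : List (String × Int × String × String))
    (hpw : Ek.Pairwise (fun a b => a.2.1 < b.2.1)) :
    ((PySem.List.min2? Ek
        (fun t => -((Ek.foldl (fun c t => c.modify t.2.2.1 0 (· + 1))
            (PySem.Dict.empty : PySem.Dict String Int)).getD t.2.2.1 0))
        (fun t => t.2.1)).getD ("", 0, "", "")).2.2.1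
      = (PySem.List.max? (Ek.map (fun t => t.2.2.1))
          (fun d => ((Ek.map (fun t => t.2.2.1)).count d : Int))).getD "" := by
  have hcnt0 : (Ek.foldl (fun c t => c.modify t.2.2.1 0 (· + 1))
        (PySem.Dict.empty : PySem.Dict String Int))
      = ((Ek.map (fun t => t.2.2.1)).foldl (fun c x => c.modify x 0 (· + 1))
        (PySem.Dict.empty : PySem.Dict String Int)) := by
    rw [List.foldl_map]
  have hcntd : ∀ d, ((Ek.foldl (fun c t => c.modify t.2.2.1 0 (· + 1))
      (PySem.Dict.empty : PySem.Dict String Int)).getD d 0)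
      = ((Ek.map (fun t => t.2.2.1)).count d : Int) := by
    intro d
    rw [hcnt0, PySem.Dict.getD_foldl_modify_add_one]
    simp [PySem.Dict.getD, PySem.Dict.empty, PySem.Dict.get?]
  have hmm := pvMin2_eq_max'
      (fun t => -((Ek.foldl (fun c t => c.modify t.2.2.1 0 (· + 1))
        (PySem.Dict.empty : PySem.Dict String Int)).getD t.2.2.1 0))
      (fun t => ((Ek.map (fun u => u.2.2.1)).count t.2.2.1 : Int))
      (fun t => t.2.1) Ek (fun t => by simp [hcntd]) hpw
  rw [hmm, pvMax?_map]
  cases hmx : PySem.List.max? Ek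
      (fun t => ((Ek.map (fun u => u.2.2.1)).count t.2.2.1 : Int)) with
  | none => rfl
  | some e => rfl

-- rank-sort restores first-occurrence order (ranks strictly increase along ks2)
theorem pvSortRank (E : List (String × Int × String × String))
    (g : String → String × List String × Int) (ks1 ks2 : List String)
    (hperm : ks2.Perm ks1)
    (hpw : ks2.Pairwise (fun a b => pvRank E a < pvRank E b))
    (hg : ∀ k, (g k).2.2 = pvRank E k) :
    PySem.List.sorted (ks1.map g) (fun m => m.2.2) false = ks2.map g := by
  apply PySem.List.sorted_eq_of_perm_of_pairwise_lt _ _ _ (hperm.map g)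
  exact (List.pairwise_map).mpr (hpw.imp (fun {a b} h => by rw [hg a, hg b]; exact h))

theorem label_descriptions_py_spec' (sd : List (String × List String)) :
    label_descriptions_py sd = label_descriptions_py_alt sd := by
  simp only [label_descriptions_py, label_descriptions_py_alt]
  simp only [pvNg_eq, show (sd.flatMap (fun p =>
      p.2.map (fun d => (PySem.Str.lower (PySem.Str.strip d), d, p.1)))) = pvFlat sd from rfl]
  set fl := pvFlat sd with hfl
  set F := fl.filter (fun t => t.1 ≠ "") with hF
  set E := ((PySem.List.enumerate fl).filter (fun q => q.2.1 ≠ "")).map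
      (fun q => (q.2.1, q.1, q.2.2.1, q.2.2.2)) with hE
  set items := PySem.List.sorted E (fun t => t.1) false with hitems
  set ng := F.foldl (fun d t => d.modify t.1 [] (· ++ [t.2])) PySem.Dict.empty with hng
  -- A-side dict facts
  have hnodupA : ng.keys.Nodup := by
    rw [hng]
    exact PySem.Dict.nodup_keys_foldl_modify_key F (fun t => t.1) []
      (fun _ t => (· ++ [t.2])) PySem.Dict.empty (by simp [PySem.Dict.keys, PySem.Dict.empty])
  have hkeysA : ng.keys = PySem.Set.ofList (F.map (fun t => t.1)) := by
    calc ng.keys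
        = PySem.Set.update PySem.Dict.empty.keys (F.map (fun t => t.1)) :=
          PySem.Dict.keys_foldl_modify_key F (fun t => t.1) [] (fun _ t => (· ++ [t.2])) PySem.Dict.empty
      _ = PySem.Set.ofList (F.map (fun t => t.1)) := PySem.Set.update_nil_left _
  have hgetDA : ∀ k, ng.getD k [] = (F.filter (fun t => t.1 == k)).map (fun t => t.2) := by
    intro k
    rw [hng, PySem.Dict.getD_foldl_modify_append]
    simp [PySem.Dict.getD, PySem.Dict.empty, PySem.Dict.get?]
  -- E/F bridges
  have hEF : E.map (fun t => (t.1, t.2.2)) = F := by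
    rw [hE, hF, List.map_map]
    have h1 : ((fun t : String × Int × String × String => (t.1, t.2.2))
        ∘ (fun q : Int × String × String × String => (q.2.1, q.1, q.2.2.1, q.2.2.2)))
        = (fun q : Int × String × String × String => q.2) := rfl
    rw [h1]
    conv_rhs => rw [← PySem.List.map_snd_enumerate fl 0]
    rw [List.filter_map]
    rfl
  have hksEF : E.map (fun t => t.1) = F.map (fun t => t.1) := by
    conv_rhs => rw [← hEF, List.map_map]
    rfl
  have hEidx : E.Pairwise (fun a b => a.2.1 < b.2.1) := by
    rw [hE]
    refine (List.pairwise_map).mpr ?_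
    have := (PySem.List.pairwise_lt_enumerate fl 0).filter
      (fun q : Int × String × String × String => decide (q.2.1 ≠ ""))
    exact this.imp (fun {a b} h => h)
  have hpw_items : items.Pairwise (fun a b => a.1 ≤ b.1) := by
    rw [hitems]
    exact PySem.List.sorted_pairwise E (fun t => t.1)
  have hSTk : ∀ k, items.filter (fun t => t.1 == k) = E.filter (fun t => t.1 == k) := by
    intro k
    rw [hitems]
    exact pvSorted_filter_key (fun t => t.1) E k
  have hpermI : (PySem.Set.ofList (items.map (fun t => t.1))).Perm
      (PySem.Set.ofList (F.map (fun t => t.1))) := by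
    rw [← hksEF]
    exact pvOfList_perm ((PySem.List.sorted_perm E (fun t => t.1) false).map (fun t => t.1))
  have hFfilter : ∀ k, F.filter (fun t => t.1 == k)
      = (E.filter (fun t => t.1 == k)).map (fun t => (t.1, t.2.2)) := by
    intro k
    rw [← hEF, List.filter_map]
    rfl
  have hEkne : ∀ k ∈ PySem.Set.ofList (F.map (fun t => t.1)),
      E.filter (fun t => t.1 == k) ≠ [] := by
    intro k hk
    have hk' : k ∈ F.map (fun t => t.1) := (PySem.Set.mem_ofList _ _).mp hk
    obtain ⟨u, hu, rfl⟩ := List.mem_map.mp hk'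
    have huf : u ∈ F.filter (fun t => t.1 == u.1) := List.mem_filter.mpr ⟨hu, by simp⟩
    intro hc
    rw [hFfilter, hc] at huf
    cases huf
  have hgroup : ∀ k : String,
      ((PySem.List.min2? (E.filter (fun t => t.1 == k))
          (fun t => -(((E.filter (fun t => t.1 == k)).foldl
              (fun c t => c.modify t.2.2.1 0 (· + 1)) PySem.Dict.empty).getD t.2.2.1 0))
          (fun t => t.2.1)).getD ("", 0, "", "")).2.2.1
        = (PySem.List.max? ((E.filter (fun t => t.1 == k)).map (fun t => t.2.2.1))
            (fun d => (((E.filter (fun t => t.1 == k)).map (fun t => t.2.2.1)).count d : Int))).getD "" :=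
    fun k => pvGroup_desc _ (hEidx.sublist List.filter_sublist)
  have hiffI : (PySem.Set.ofList (items.map (fun t => t.1)) = [])
      ↔ (PySem.Set.ofList (F.map (fun t => t.1)) = []) := by
    constructor
    · intro h; have hp := hpermI; rw [h] at hp; exact (hp.symm.eq_nil)
    · intro h; have hp := hpermI.symm; rw [h] at hp; exact (hp.symm.eq_nil)
  -- rewrite B's runs into per-key groups over E
  rw [pvRuns_eq items hpw_items, List.map_map]
  simp only [hSTk]
  by_cases hcase : ng.items = []
  · have hksF_nil : PySem.Set.ofList (F.map (fun t => t.1)) = [] := by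
      rw [← hkeysA, hng]
      show PySem.Dict.keys _ = []
      rw [← hng]
      simp [PySem.Dict.keys, hcase]
    have hksI_nil : PySem.Set.ofList (items.map (fun t => t.1)) = [] := hiffI.mpr hksF_nil
    rw [if_pos hcase, hksI_nil]
    simp
  · have hksF_ne : PySem.Set.ofList (F.map (fun t => t.1)) ≠ [] := by
      intro hc
      apply hcase
      have hkeys_nil : ng.keys = [] := by rw [hkeysA, hc]
      have : ng.items.map (fun p => p.1) = [] := hkeys_nil
      exact List.map_eq_nil_iff.mp this
    have hksI_ne : PySem.Set.ofList (items.map (fun t => t.1)) ≠ [] :=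
      fun hc => hksF_ne (hiffI.mp hc)
    rw [if_neg hcase]
    simp only [List.map_eq_nil_iff]
    rw [if_neg hksI_ne]
    rw [pvSortRank E _ _ (PySem.Set.ofList (F.map (fun t => t.1))) hpermI.symm
      (by
        have := pvRank_pairwise E hEidx
        rwa [hksEF] at this)
      (fun k => rfl)]
    have hvalsA : ng.values = ng.keys.map (fun k => ng.getD k []) :=
      pvValues_eq_map_getD ng.items [] hnodupA
    rw [hvalsA, hkeysA, List.map_map]
    simp only [hgetDA, hFfilter, List.map_map]
    simp only [pvCanonical_eq, Function.comp_def, List.map_map]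
    simp only [hgroup]

-- ===== VERDICT (by name: the statement is the Claim_ definition above) =====
theorem label_descriptions_py_spec : Claim_equal_label_descriptions_py := by
  intro sd _
  exact label_descriptions_py_spec' sd
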